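-- pv_equiv track=rewrite | github.com/lslavik612-collab/python_trainee | leed_nums+.py | leed_nums
-- ===== SOURCE A (Python) =====
-- def leed_nums(nums):
--     rez = []
--     max_el = nums[-1]
--     n = len(nums)
--     for i in range(n-1,-1,-1):
--         if nums[i] > max_el:
--             rez.append(nums[i])
--             max_el = nums[i]
--     return rez
-- ===== SOURCE B (Python) =====
-- def leed_nums(nums):
--     # Build the suffix-maximum table: suf[i] == max(nums[i:]); then filter against it.
--     suf = []
--     for x in reversed(nums):
--         suf.append(x if not suf else max(x, suf[-1]))
--     suf.reverse()
--     rez = [x for x, t in zip(nums, suf[1:]) if x > t]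
--     rez.reverse()
--     return rez
-- ===== Notes on version B (the rewrite author's own statement) =====
-- stated objective: alternative
-- what changed: A keeps a single running-max accumulator in one right-to-left index loop; B first builds an explicit suffix-maximum table in one backward pass and then filters nums against the shifted table in a separate pass.
import Mathlib
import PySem

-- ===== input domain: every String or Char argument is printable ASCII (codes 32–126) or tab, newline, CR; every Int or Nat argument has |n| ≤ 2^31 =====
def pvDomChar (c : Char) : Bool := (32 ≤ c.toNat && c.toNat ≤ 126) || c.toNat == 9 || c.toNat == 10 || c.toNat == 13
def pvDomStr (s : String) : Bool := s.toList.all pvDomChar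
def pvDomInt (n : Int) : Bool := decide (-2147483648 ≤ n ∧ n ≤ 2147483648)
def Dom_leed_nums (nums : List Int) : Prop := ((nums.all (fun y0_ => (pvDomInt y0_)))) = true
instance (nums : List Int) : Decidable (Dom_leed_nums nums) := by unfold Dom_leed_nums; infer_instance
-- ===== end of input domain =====

-- B replaces A's single right-to-left running-max accumulator by a suffix-maximum table built
-- in one pass and a separate filtering pass (different decomposition, same cost).

-- ===== PORT A =====
def leed_nums (nums : List Int) : List Int :=
  match PySem.List.pyGet? nums (-1) with
  | none => []  -- Python raises IndexError on the last-element access; excluded by Pre_leed_nums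
  | some max_el =>
    ((PySem.List.pyRange ((nums.length : Int) - 1) (-1) (-1)).foldl
      (fun (st : List Int × Int) i =>
        if st.2 < PySem.List.pyGetD nums i 0 then
          (st.1 ++ [PySem.List.pyGetD nums i 0], PySem.List.pyGetD nums i 0)
        else st)
      ([], max_el)).1

-- ===== PORT B =====
def leed_nums_alt (nums : List Int) : List Int :=
  -- suf (after the reverse) is the suffix-maximum table: suf[i] = max(nums[i:])
  let suf := (nums.reverse.foldl
      (fun (acc : List Int) x => acc ++ [if acc = [] then x else max x (acc.getLastD 0)])
      []).reverse
  -- suf[1:] is suf.tail; zip truncates to the shorter list exactly as Python's zip does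
  (((nums.zip suf.tail).filter (fun p => p.2 < p.1)).map Prod.fst).reverse

-- ===== PRECONDITION & SPEC =====
-- Pre_ excludes only the empty list, on which A's last-element access raises IndexError.
def Pre_leed_nums (nums : List Int) : Prop := nums ≠ []
instance (nums : List Int) : Decidable (Pre_leed_nums nums) := by unfold Pre_leed_nums; infer_instance
def pvWitness_leed_nums : List Int := [1, 3, 2]

def Spec_leed_nums (nums : List Int) (out : List Int) : Prop := out = leed_nums_alt nums
instance (nums : List Int) (out : List Int) : Decidable (Spec_leed_nums nums out) := by unfold Spec_leed_nums; infer_instance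

-- ===== CLAIM (what is proved, stated in full; the proofs are below) =====
def Claim_equal_leed_nums : Prop := ∀ (nums : List Int), Dom_leed_nums nums → Pre_leed_nums nums → Spec_leed_nums nums (leed_nums nums)

-- ===== LEMMAS AND PROOFS =====

-- running maxima of a list, seeded with m (the suffix-max table of A read on the reversed list)
def pvScanMax (m : Int) : List Int → List Int
  | [] => []
  | x :: xs => max x m :: pvScanMax (max x m) xs

-- elements strictly exceeding the running maximum, seeded with m
def pvExceed (m : Int) : List Int → List Int
  | [] => []
  | x :: xs => if m < x then x :: pvExceed x xs else pvExceed m xs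

lemma pvScanMax_length (m : Int) (xs : List Int) : (pvScanMax m xs).length = xs.length := by
  induction xs generalizing m with
  | nil => rfl
  | cons x xs ih => simp [pvScanMax, ih]

lemma pvFoldA (xs : List Int) : ∀ (m : Int) (acc : List Int),
    (xs.foldl (fun (st : List Int × Int) v =>
      if st.2 < v then (st.1 ++ [v], v) else st) (acc, m)).1 = acc ++ pvExceed m xs := by
  induction xs with
  | nil => simp [pvExceed]
  | cons x xs ih =>
    intro m acc
    by_cases h : m < x
    · simp [pvExceed, h, ih]
    · simp [pvExceed, h, ih]

lemma pvBuildScan (xs : List Int) : ∀ (acc : List Int) (m : Int), acc ≠ [] → acc.getLastD 0 = m →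
    xs.foldl (fun (acc : List Int) x => acc ++ [if acc = [] then x else max x (acc.getLastD 0)]) acc
      = acc ++ pvScanMax m xs := by
  induction xs with
  | nil => simp [pvScanMax]
  | cons y ys ih =>
    intro acc m hne hlast
    have hlast' : acc.getLast?.getD 0 = m := by
      rw [← List.getLastD_eq_getLast?]; exact hlast
    have hstep : (acc ++ [if acc = [] then y else max y (acc.getLastD 0)]) = acc ++ [max y m] := by
      simp [hne, List.getLastD_eq_getLast?, hlast']
    have h2 := ih (acc ++ [max y m]) (max y m) (by simp) (by simp)
    simp only [List.foldl_cons, hstep, h2, pvScanMax, List.append_assoc]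
    rfl

lemma pvZipScan (xs : List Int) : ∀ (m : Int),
    ((xs.zip (m :: pvScanMax m xs)).filter (fun p => p.2 < p.1)).map Prod.fst = pvExceed m xs := by
  induction xs with
  | nil => intro m; rfl
  | cons y ys ih =>
    intro m
    by_cases h : m < y
    · have : max y m = y := by omega
      simp [pvScanMax, pvExceed, h, this, ih]
    · have : max y m = m := by omega
      simp [pvScanMax, pvExceed, h, this, ih]

lemma pvZipRev (u v : List Int) (h : u.length = v.length) :
    u.reverse.zip v.reverse = (u.zip v).reverse := by
  apply List.ext_getElem
  · simp [h]
  · intro i h1 h2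
    simp only [List.getElem_zip, List.getElem_reverse, List.length_zip] at *
    congr 1 <;> congr 1 <;> omega

lemma pvZipDropLast (u v : List Int) (h : u.length < v.length) : u.zip v.dropLast = u.zip v := by
  induction u generalizing v with
  | nil => simp
  | cons a u ih =>
    cases v with
    | nil => simp at h
    | cons b v =>
      cases v with
      | nil => simp at h
      | cons c w => simp_all [List.zip]

lemma pvZipAppendRight (u v : List Int) (a : Int) (h : v.length ≤ u.length) :
    (u ++ [a]).zip v = u.zip v := by
  induction u generalizing v with
  | nil =>
    cases v with
    | nil => simp
    | cons b w => simp at h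
  | cons c u ih =>
    cases v with
    | nil => simp
    | cons b w => simp_all [List.zip]

lemma pvAltChar (nums : List Int) (x : Int) (xs : List Int) (hx : nums.reverse = x :: xs) :
    leed_nums_alt nums = pvExceed x xs := by
  have hn : nums = xs.reverse ++ [x] := by
    have := congrArg List.reverse hx
    simpa using this
  unfold leed_nums_alt
  rw [hx]
  have hbuild : (x :: xs).foldl
      (fun (acc : List Int) x => acc ++ [if acc = [] then x else max x (acc.getLastD 0)]) []
      = x :: pvScanMax x xs := by
    have := pvBuildScan xs [x] x (by simp) (by simp)
    simpa using this
  rw [hbuild]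
  show (((nums.zip ((x :: pvScanMax x xs).reverse).tail).filter
      (fun p => p.2 < p.1)).map Prod.fst).reverse = pvExceed x xs
  rw [List.tail_reverse]
  have hlen : xs.length = ((x :: pvScanMax x xs).dropLast).length := by
    simp [pvScanMax_length]
  have hz : nums.zip (x :: pvScanMax x xs).dropLast.reverse
      = (xs.zip (x :: pvScanMax x xs).dropLast).reverse := by
    calc nums.zip (x :: pvScanMax x xs).dropLast.reverse
        = xs.reverse.zip (x :: pvScanMax x xs).dropLast.reverse := by
          rw [hn]; exact pvZipAppendRight _ _ _ (by simp [← hlen])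
      _ = (xs.zip (x :: pvScanMax x xs).dropLast).reverse := pvZipRev _ _ hlen
  rw [hz, List.filter_reverse, List.map_reverse, List.reverse_reverse,
    pvZipDropLast _ _ (by simp [pvScanMax_length]), pvZipScan]

lemma pvAChar (nums : List Int) (x : Int) (xs : List Int) (hx : nums.reverse = x :: xs) :
    leed_nums nums = pvExceed x xs := by
  have hlast : nums.getLast? = some x := by
    rw [← List.head?_reverse, hx]; rfl
  unfold leed_nums
  rw [PySem.List.pyGet?_neg_one, hlast]
  show ((PySem.List.pyRange ((nums.length : Int) - 1) (-1) (-1)).foldl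
      (fun (st : List Int × Int) i =>
        if st.2 < PySem.List.pyGetD nums i 0 then
          (st.1 ++ [PySem.List.pyGetD nums i 0], PySem.List.pyGetD nums i 0)
        else st) ([], x)).1 = pvExceed x xs
  have hrange : PySem.List.pyRange ((nums.length : Int) - 1) (-1) (-1)
      = (PySem.List.pyRange 0 (nums.length : Int) 1).reverse := by
    rw [PySem.List.pyRange_neg_one_eq_reverse]
    norm_num
  have hfold : ((PySem.List.pyRange 0 (nums.length : Int) 1).reverse.foldl
      (fun (st : List Int × Int) i =>
        if st.2 < PySem.List.pyGetD nums i 0 then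
          (st.1 ++ [PySem.List.pyGetD nums i 0], PySem.List.pyGetD nums i 0)
        else st) ([], x))
      = (nums.reverse.foldl (fun (st : List Int × Int) v =>
          if st.2 < v then (st.1 ++ [v], v) else st) ([], x)) := by
    conv_rhs => rw [← PySem.List.map_pyGetD_pyRange_zero' nums 0]
    rw [← List.map_reverse, List.foldl_map]
  rw [hrange, hfold]
  have := pvFoldA nums.reverse x []
  rw [hx] at this ⊢
  simp only [List.foldl_cons, lt_self_iff_false, if_false] at this ⊢
  rw [this]
  simp [pvExceed]

-- ===== VERDICT (by name: the statement is the Claim_ definition above) =====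
theorem leed_nums_spec : Claim_equal_leed_nums := by
  intro nums _ hpre
  unfold Spec_leed_nums
  have hrev : nums.reverse ≠ [] := by simpa using hpre
  obtain ⟨x, xs, hx⟩ := List.exists_cons_of_ne_nil hrev
  rw [pvAChar nums x xs hx, pvAltChar nums x xs hx]
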